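-- pv_equiv track=rewrite | github.com/Agnuxo1/Speaking-to-Silicon-THERMODYNAMIC_PROBABILITY_FILTER_TPF | veselov_mathematics.py | compute_level_boundaries
-- ===== SOURCE A (Python) =====
-- from typing import Dict, List, Optional, Tuple, Deque
--
-- WORD_SIZE = 64  # Tamaño base en bits (del paper)
--
-- def compute_level_size(k: int, word_size: int = WORD_SIZE) -> int:
--     """
--     Calcula el tamaño del nivel k en bits.
--
--     Fórmula: Sₖ = 64 · 2ᵏ para k > 0, S₀ = 64
--
--     Args:
--         k: Índice del nivel (0, 1, 2, ...)
--         word_size: Tamaño base (por defecto 64 bits)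
--
--     Returns:
--         Tamaño del nivel en bits
--     """
--     if k == 0:
--         return word_size
--     return word_size * (2 ** k)
--
-- def compute_level_boundaries(num_levels: int) -> List[Tuple[int, int]]:
--     """
--     Calcula los límites [start, end) de cada nivel.
--
--     Returns:
--         Lista de tuplas (bit_start, bit_end) para cada nivel
--     """
--     boundaries = []
--     current_start = 0
--
--     for k in range(num_levels):
--         size = compute_level_size(k)
--         boundaries.append((current_start, current_start + size))
--         current_start += size
--
--     return boundaries
-- ===== SOURCE B (Python) =====
-- def compute_level_boundaries(num_levels):
--     # Closed form: level k spans [64*(2^k - 1), 64*(2^(k+1) - 1)); no running accumulator.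
--     return [(64 * ((1 << k) - 1), 64 * ((2 << k) - 1)) for k in range(num_levels)]
-- ===== Notes on version B (the rewrite author's own statement) =====
-- stated objective: faster
-- what changed: Replaced the stateful loop accumulating current_start (via a helper compute_level_size with a redundant k==0 branch) by a direct per-level closed form start_k = 64*(2^k - 1), end_k = 64*(2^(k+1) - 1) computed with bit shifts, returned as a single comprehension.
import Mathlib
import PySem

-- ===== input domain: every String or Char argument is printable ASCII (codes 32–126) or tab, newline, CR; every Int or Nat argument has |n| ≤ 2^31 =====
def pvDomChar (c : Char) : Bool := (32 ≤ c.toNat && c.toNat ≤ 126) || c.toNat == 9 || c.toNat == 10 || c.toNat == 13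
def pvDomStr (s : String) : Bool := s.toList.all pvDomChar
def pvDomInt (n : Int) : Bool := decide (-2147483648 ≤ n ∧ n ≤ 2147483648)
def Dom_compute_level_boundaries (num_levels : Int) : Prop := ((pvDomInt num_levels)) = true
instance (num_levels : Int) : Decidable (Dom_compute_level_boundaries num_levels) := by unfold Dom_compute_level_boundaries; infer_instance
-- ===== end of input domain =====

-- B replaces A's accumulator loop (and its helper) with a per-level closed form; objective: simpler.

-- ===== PORT A =====
-- compute_level_size(k): k reached here only from range(num_levels), so 0 ≤ k and 2**k = 2^k.toNat exactly
def compute_level_size (k : Int) (word_size : Int) : Int :=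
  if k = 0 then word_size else word_size * (2 ^ k.toNat)

def compute_level_boundaries (num_levels : Int) : List (Int × Int) :=
  let st := (PySem.List.pyRange 0 num_levels 1).foldl
    (fun (st : List (Int × Int) × Int) k =>
      let size := compute_level_size k 64
      (st.1 ++ [(st.2, st.2 + size)], st.2 + size))
    ([], 0)
  st.1

-- ===== PORT B =====
def compute_level_boundaries_alt (num_levels : Int) : List (Int × Int) :=
  -- Python's 1 << k / 2 << k (k ≥ 0, from range) are exactly 2 ^ k / 2 ^ (k+1)
  (PySem.List.pyRange 0 num_levels 1).map
    (fun k => (64 * ((2 : Int) ^ k.toNat - 1), 64 * ((2 : Int) ^ (k.toNat + 1) - 1)))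

-- ===== PRECONDITION & SPEC =====
def Spec_compute_level_boundaries (num_levels : Int) (out : List (Int × Int)) : Prop := out = compute_level_boundaries_alt num_levels
instance (num_levels : Int) (out : List (Int × Int)) : Decidable (Spec_compute_level_boundaries num_levels out) := by unfold Spec_compute_level_boundaries; infer_instance

-- ===== CLAIM (what is proved, stated in full; the proofs are below) =====
def Claim_equal_compute_level_boundaries : Prop := ∀ (num_levels : Int), Dom_compute_level_boundaries num_levels → Spec_compute_level_boundaries num_levels (compute_level_boundaries num_levels)

-- ===== LEMMAS AND PROOFS =====

-- Loop invariant: after processing range(0, n), the accumulator is B's closed-form list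
-- and current_start = 64*(2^n - 1).
lemma loop_closed_form (n : Nat) :
    (PySem.List.pyRange 0 (n : Int) 1).foldl
      (fun (st : List (Int × Int) × Int) k =>
        let size := compute_level_size k 64
        (st.1 ++ [(st.2, st.2 + size)], st.2 + size))
      ([], 0)
    = ((PySem.List.pyRange 0 (n : Int) 1).map
        (fun k => (64 * ((2 : Int) ^ k.toNat - 1), 64 * ((2 : Int) ^ (k.toNat + 1) - 1))),
       64 * (2 ^ n - 1)) := by
  induction n with
  | zero => simp [PySem.List.pyRange]
  | succ m ih =>
      rw [show ((m + 1 : Nat) : Int) = (m : Int) + 1 by push_cast; ring,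
          PySem.List.pyRange_one_succ_right (by omega)]
      rw [List.foldl_append, List.map_append, ih]
      simp only [List.foldl_cons, List.foldl_nil, List.map_cons, List.map_nil]
      have hs : compute_level_size (m : Int) 64 = 64 * 2 ^ m := by
        simp only [compute_level_size, Int.toNat_natCast]
        split_ifs with h
        · have : m = 0 := by exact_mod_cast h
          subst this; norm_num
        · rfl
      simp only [hs, Int.toNat_natCast, Prod.mk.injEq, List.append_cancel_left_eq,
        List.cons.injEq, and_true, pow_succ]
      refine ⟨⟨trivial, ?_⟩, ?_⟩ <;> ring

-- ===== VERDICT (by name: the statement is the Claim_ definition above) =====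
theorem compute_level_boundaries_spec : Claim_equal_compute_level_boundaries := by
  intro n _
  unfold Spec_compute_level_boundaries compute_level_boundaries compute_level_boundaries_alt
  by_cases h : 0 ≤ n
  · obtain ⟨m, rfl⟩ := Int.eq_ofNat_of_zero_le h
    simp [loop_closed_form m]
  · have : PySem.List.pyRange 0 n 1 = [] := by
      simp [PySem.List.pyRange]; omega
    simp [this]
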